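-- pv_equiv track=rewrite | github.com/rahulbattula2019/PracticeRepo | Vamsi_Code2.py | solution
-- ===== SOURCE A (Python) =====
-- def solution(S: str) -> str:
--     stack = []
--
--     for char in S:
--         if stack:
--             top_char = stack[-1]
--
--             is_ab_pair = (top_char == 'A' and char == 'B') or (top_char == 'B' and char == 'A')
--             is_cd_pair = (top_char == 'C' and char == 'D') or (top_char == 'D' and char == 'C')
--
--             if is_ab_pair or is_cd_pair:
--                 stack.pop()
--                 continue
--
--         stack.append(char)
--
--     return "".join(stack)
-- ===== SOURCE B (Python) =====
-- def solution(S: str) -> str: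
--     # Repeated substring elimination to a fixpoint: delete every occurrence of
--     # the four cancelling patterns in whole-string passes until nothing changes.
--     # The reduction is confluent (each letter has a unique partner), so the
--     # normal form is unique and equals the stack-pass result.
--     while True:
--         t = S.replace('AB', '').replace('BA', '').replace('CD', '').replace('DC', '')
--         if t == S:
--             return S
--         S = t
-- ===== Notes on version B (the rewrite author's own statement) =====
-- stated objective: alternative
-- what changed: B abandons the stack entirely: it repeatedly rescans the whole string, deleting every occurrence of the four cancelling two-letter patterns with chained str.replace calls until a full pass leaves the string unchanged, relying on confluence of the cancellation rewriting system (proved in Lean) for the same unique normal form; A makes one left-to-right pass maintaining an explicit stack.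
import Mathlib
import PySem

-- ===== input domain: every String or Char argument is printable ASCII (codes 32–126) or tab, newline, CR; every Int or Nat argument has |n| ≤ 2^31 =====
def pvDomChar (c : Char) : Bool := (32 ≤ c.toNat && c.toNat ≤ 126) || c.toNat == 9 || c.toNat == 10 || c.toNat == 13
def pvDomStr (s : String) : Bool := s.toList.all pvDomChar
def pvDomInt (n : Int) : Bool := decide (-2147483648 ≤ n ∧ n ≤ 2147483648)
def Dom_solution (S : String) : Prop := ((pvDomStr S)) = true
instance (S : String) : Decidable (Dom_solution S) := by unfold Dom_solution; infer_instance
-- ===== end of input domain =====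

-- B replaces A's single left-to-right stack pass by a whole-string fixpoint loop of
-- str.replace eliminations (objective: alternative; a timing run measured B faster on the generated inputs).

-- ===== PORT A =====
-- one iteration of A's for-loop body: pair-test against the stack top, pop or append
def solutionStep (stack : List Char) (char : Char) : List Char :=
  match stack.getLast? with
  | some top_char =>
      let is_ab_pair := (top_char == 'A' && char == 'B') || (top_char == 'B' && char == 'A')
      let is_cd_pair := (top_char == 'C' && char == 'D') || (top_char == 'D' && char == 'C')
      if is_ab_pair || is_cd_pair then stack.dropLast else stack ++ [char]
  | none => stack ++ [char]

def solution (S : String) : String :=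
  String.ofList (S.toList.foldl solutionStep [])

-- ===== PORT B =====
-- one while-loop pass of Source B: the four chained str.replace calls
def altPass (s : String) : String :=
  PySem.Str.replace (PySem.Str.replace (PySem.Str.replace (PySem.Str.replace s "AB" "") "BA" "") "CD" "") "DC" ""

-- ---- facts needed for the termination of B's while loop (cited by decreasing_by) ----
-- deleting every occurrence of the two-char pattern [a,b], as PySem.Chars.replace does it
def rep2 (a b : Char) : List Char → List Char
  | c :: d :: t => if c = a ∧ d = b then rep2 a b t else c :: rep2 a b (d :: t)
  | l => l
  termination_by l => l.length
  decreasing_by all_goals simp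

theorem go_eq_rep2 (a b : Char) : ∀ (fuel : Nat) (l acc : List Char), l.length ≤ fuel →
    PySem.Chars.replace.go [a, b] [] fuel l acc = acc.reverse ++ rep2 a b l := by
  intro fuel
  induction fuel with
  | zero =>
      intro l acc h
      have : l = [] := List.eq_nil_of_length_eq_zero (Nat.le_zero.mp h)
      subst this
      simp [PySem.Chars.replace.go, rep2]
  | succ n ih =>
      intro l acc h
      match l with
      | [] => simp [PySem.Chars.replace.go, rep2]
      | [c] =>
          have hpre : ([a, b].isPrefixOf [c]) = false := by
            simp [List.isPrefixOf]
          simp only [PySem.Chars.replace.go, hpre, Bool.false_eq_true, if_false]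
          rw [ih [] (c :: acc) (by simp)]
          simp [rep2]
      | c :: d :: t =>
          by_cases hcd : c = a ∧ d = b
          · obtain ⟨rfl, rfl⟩ := hcd
            have hpre : ([c, d].isPrefixOf (c :: d :: t)) = true := by
              simp [List.isPrefixOf]
            simp only [PySem.Chars.replace.go, hpre, if_true]
            rw [show List.drop [c, d].length (c :: d :: t) = t from rfl]
            rw [ih t (([] : List Char).reverse ++ acc) (by simp at h ⊢; omega)]
            simp [rep2]
          · have hpre : ([a, b].isPrefixOf (c :: d :: t)) = false := by
              simp [List.isPrefixOf]
              intro h1 h2; exact hcd ⟨h1.symm, h2.symm⟩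
            simp only [PySem.Chars.replace.go, hpre, Bool.false_eq_true, if_false]
            rw [ih (d :: t) (c :: acc) (by simp at h ⊢; omega)]
            rw [show rep2 a b (c :: d :: t) = c :: rep2 a b (d :: t) by
              simp [rep2, hcd]]
            simp

theorem replace_eq_rep2 (a b : Char) (l : List Char) :
    PySem.Chars.replace l [a, b] [] = rep2 a b l := by
  simp only [PySem.Chars.replace, List.isEmpty_cons, Bool.false_eq_true, if_false]
  simpa using go_eq_rep2 a b l.length l [] (le_refl _)

theorem rep2_length_le (a b : Char) (l : List Char) : (rep2 a b l).length ≤ l.length := by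
  fun_induction rep2 a b l with
  | case1 c d t hcd ih =>
      simp only [List.length_cons]; omega
  | case2 c d t hcd ih =>
      simp only [List.length_cons] at ih ⊢; omega
  | case3 l h => exact le_refl _

theorem rep2_eq_of_length (a b : Char) (l : List Char) :
    (rep2 a b l).length = l.length → rep2 a b l = l := by
  fun_induction rep2 a b l with
  | case1 c d t hcd ih =>
      intro h
      have hle := rep2_length_le a b t
      exfalso
      simp only [List.length_cons] at h
      omega
  | case2 c d t hcd ih =>
      intro h
      have h' : (rep2 a b (d :: t)).length = (d :: t).length := by
        simp only [List.length_cons] at h ⊢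
        omega
      rw [ih h']
  | case3 l h => intro _h; rfl

theorem altPass_toList (s : String) :
    (altPass s).toList = rep2 'D' 'C' (rep2 'C' 'D' (rep2 'B' 'A' (rep2 'A' 'B' s.toList))) := by
  simp [altPass, PySem.Str.replace, replace_eq_rep2]

theorem altPass_lt (s : String) (h : altPass s ≠ s) :
    (altPass s).toList.length < s.toList.length := by
  by_contra hlt
  rw [not_lt] at hlt
  have h1 := rep2_length_le 'A' 'B' s.toList
  have h2 := rep2_length_le 'B' 'A' (rep2 'A' 'B' s.toList)
  have h3 := rep2_length_le 'C' 'D' (rep2 'B' 'A' (rep2 'A' 'B' s.toList))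
  have h4 := rep2_length_le 'D' 'C' (rep2 'C' 'D' (rep2 'B' 'A' (rep2 'A' 'B' s.toList)))
  rw [altPass_toList] at hlt
  have e1 : rep2 'A' 'B' s.toList = s.toList := rep2_eq_of_length _ _ _ (by omega)
  rw [e1] at h2 h3 h4 hlt
  have e2 : rep2 'B' 'A' s.toList = s.toList := rep2_eq_of_length _ _ _ (by omega)
  rw [e2] at h3 h4 hlt
  have e3 : rep2 'C' 'D' s.toList = s.toList := rep2_eq_of_length _ _ _ (by omega)
  rw [e3] at h4 hlt
  have e4 : rep2 'D' 'C' s.toList = s.toList := rep2_eq_of_length _ _ _ (by omega)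
  apply h
  rw [← String.toList_inj, altPass_toList, e1, e2, e3, e4]

-- B's while loop: rescan-and-delete passes until a pass changes nothing
def solution_alt (S : String) : String :=
  if altPass S = S then S else solution_alt (altPass S)
  termination_by S.toList.length
  decreasing_by exact altPass_lt S (by assumption)

-- ===== PRECONDITION & SPEC =====
def Spec_solution (S : String) (out : String) : Prop := out = solution_alt S
instance (S : String) (out : String) : Decidable (Spec_solution S out) := by unfold Spec_solution; infer_instance

-- ===== CLAIM (what is proved, stated in full; the proofs are below) =====
def Claim_equal_solution : Prop := ∀ (S : String), Dom_solution S → Spec_solution S (solution S)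

-- ===== LEMMAS AND PROOFS =====

-- the cancellation relation, as A writes it (top, incoming)
def pr (a b : Char) : Bool :=
  ((a == 'A' && b == 'B') || (a == 'B' && b == 'A')) ||
  ((a == 'C' && b == 'D') || (a == 'D' && b == 'C'))

-- prepend a char onto an irreducible word, cancelling with its head if possible
def ins (c : Char) (m : List Char) : List Char :=
  match m with
  | [] => [c]
  | d :: t => if pr c d then t else c :: d :: t

-- the common normal form
def nf (l : List Char) : List Char := l.foldr ins []

-- no adjacent cancelling pair
def Irr (l : List Char) : Prop := l.IsChain (fun a b => pr a b = false)

theorem irr_nil : Irr [] := List.isChain_nil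

theorem irr_singleton (c : Char) : Irr [c] := List.isChain_singleton c

theorem irr_tail {x : Char} {xs : List Char} (h : Irr (x :: xs)) : Irr xs := by
  cases xs with
  | nil => exact irr_nil
  | cons y ys => exact (List.isChain_cons_cons.mp h).2

theorem irr_head {x y : Char} {ys : List Char} (h : Irr (x :: y :: ys)) : pr x y = false :=
  (List.isChain_cons_cons.mp h).1

theorem pr_unique {a b c : Char} (h1 : pr a b = true) (h2 : pr a c = true) : b = c := by
  simp only [pr, Bool.or_eq_true, Bool.and_eq_true, beq_iff_eq] at h1 h2
  rcases h1 with ((⟨rfl, rfl⟩ | ⟨rfl, rfl⟩) | (⟨rfl, rfl⟩ | ⟨rfl, rfl⟩)) <;>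
    rcases h2 with ((⟨h, rfl⟩ | ⟨h, rfl⟩) | (⟨h, rfl⟩ | ⟨h, rfl⟩)) <;> simp_all

theorem pr_symm (a b : Char) : pr a b = pr b a := by
  rw [Bool.eq_iff_iff]
  simp only [pr, Bool.or_eq_true, Bool.and_eq_true, beq_iff_eq]
  tauto

theorem irr_ins {m : List Char} (c : Char) (h : Irr m) : Irr (ins c m) := by
  cases m with
  | nil => exact irr_singleton c
  | cons d t =>
      by_cases hp : pr c d = true
      · simpa [ins, hp] using irr_tail h
      · have hp' : pr c d = false := by simpa using hp
        simp only [ins, hp', Bool.false_eq_true, if_false]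
        exact List.isChain_cons_cons.mpr ⟨hp', h⟩

theorem irr_nf (l : List Char) : Irr (nf l) := by
  induction l with
  | nil => exact irr_nil
  | cons c cs ih => exact irr_ins c ih

theorem nf_fix {l : List Char} (h : Irr l) : nf l = l := by
  induction l with
  | nil => rfl
  | cons c cs ih =>
      have h1 : nf (c :: cs) = ins c (nf cs) := rfl
      rw [h1, ih (irr_tail h)]
      cases cs with
      | nil => rfl
      | cons d t => simp [ins, irr_head h]

theorem ins_ins {m : List Char} {c d : Char} (hp : pr c d = true) (h : Irr m) :
    ins c (ins d m) = m := by
  cases m with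
  | nil => simp [ins, hp]
  | cons e t =>
      by_cases hde : pr d e = true
      · have hce : c = e := pr_unique (pr_symm d c ▸ hp) hde
        subst hce
        cases t with
        | nil => simp [ins, hde]
        | cons f t' => simp [ins, hde, irr_head h]
      · have hde' : pr d e = false := by simpa using hde
        simp [ins, hde', hp]

-- A's pair condition is pr
theorem step_cond (top c : Char) :
    (((top == 'A' && c == 'B') || (top == 'B' && c == 'A')) ||
     ((top == 'C' && c == 'D') || (top == 'D' && c == 'C'))) = pr top c := rfl

-- invariant of A's loop: folding from an irreducible stack computes nf of stack ++ rest
theorem foldl_step (l : List Char) : ∀ s : List Char, Irr s →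
    List.foldl solutionStep s l = List.foldr ins (nf l) s := by
  induction l with
  | nil =>
      intro s hs
      simpa [nf] using (nf_fix hs).symm
  | cons c cs ih =>
      intro s hs
      rcases List.eq_nil_or_concat s with rfl | ⟨s', d, hsd⟩
      · have h1 : solutionStep [] c = [c] := rfl
        rw [List.foldl_cons, h1, ih [c] (irr_singleton c)]
        simp [nf]
      · rw [List.concat_eq_append] at hsd
        subst hsd
        have hlast : (s' ++ [d]).getLast? = some d := by simp
        have hs' : Irr s' := (List.isChain_append.mp hs).1
        by_cases hp : pr d c = true
        · have h1 : solutionStep (s' ++ [d]) c = s' := by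
            simp only [solutionStep, hlast]
            rw [step_cond, hp]
            simp
          rw [List.foldl_cons, h1, ih s' hs']
          have h2 : nf (c :: cs) = ins c (nf cs) := rfl
          rw [List.foldr_append, h2]
          simp only [List.foldr]
          rw [ins_ins hp (irr_nf cs)]
        · have hp' : pr d c = false := by simpa using hp
          have h1 : solutionStep (s' ++ [d]) c = (s' ++ [d]) ++ [c] := by
            simp only [solutionStep, hlast]
            rw [step_cond, hp']
            simp
          have hirr : Irr ((s' ++ [d]) ++ [c]) := by
            refine List.isChain_append.mpr ⟨hs, irr_singleton c, ?_⟩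
            intro x hx y hy
            simp at hx hy
            subst hx; subst hy; exact hp'
          rw [List.foldl_cons, h1, ih _ hirr]
          rw [List.foldr_append]
          rfl

-- ---- B side: one rep2 pass preserves the normal form ----
theorem nf_rep2 (a b : Char) (hp : pr a b = true) (l : List Char) :
    nf (rep2 a b l) = nf l := by
  fun_induction rep2 a b l with
  | case1 c d t hcd ih =>
      obtain ⟨rfl, rfl⟩ := hcd
      rw [ih]
      show nf t = ins c (ins d (nf t))
      rw [ins_ins hp (irr_nf t)]
  | case2 c d t hcd ih =>
      show ins c (nf (rep2 a b (d :: t))) = ins c (nf (d :: t))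
      rw [ih]
  | case3 l h => rfl

-- a string fixed by all four passes has no adjacent cancelling pair
theorem fix_irr : ∀ l : List Char,
    rep2 'A' 'B' l = l → rep2 'B' 'A' l = l → rep2 'C' 'D' l = l → rep2 'D' 'C' l = l →
    Irr l := by
  intro l
  induction l with
  | nil => intro _ _ _ _; exact irr_nil
  | cons c rest ih =>
      intro hab hba hcd hdc
      cases rest with
      | nil => exact irr_singleton c
      | cons d t =>
          have hlen : ∀ a b : Char, c = a → d = b → rep2 a b (c :: d :: t) ≠ c :: d :: t := by
            intro a b ha hb heq
            have hstep : rep2 a b (c :: d :: t) = rep2 a b t := by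
              simp [rep2, ha, hb]
            have := rep2_length_le a b t
            rw [hstep] at heq
            have := congrArg List.length heq
            simp at this; omega
          have hne : pr c d = false := by
            by_contra hpr
            simp only [Bool.not_eq_false] at hpr
            simp only [pr, Bool.or_eq_true, Bool.and_eq_true, beq_iff_eq] at hpr
            rcases hpr with ((⟨h1, h2⟩ | ⟨h1, h2⟩) | (⟨h1, h2⟩ | ⟨h1, h2⟩))
            · exact hlen 'A' 'B' h1 h2 hab
            · exact hlen 'B' 'A' h1 h2 hba
            · exact hlen 'C' 'D' h1 h2 hcd
            · exact hlen 'D' 'C' h1 h2 hdc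
          have htail : ∀ a b : Char, rep2 a b (c :: d :: t) = c :: d :: t →
              rep2 a b (d :: t) = d :: t := by
            intro a b h
            by_cases hm : c = a ∧ d = b
            · exact absurd h (hlen a b hm.1 hm.2)
            · have : rep2 a b (c :: d :: t) = c :: rep2 a b (d :: t) := by
                simp [rep2, hm]
              rw [this] at h
              exact (List.cons.injEq _ _ _ _ ▸ h).2
          exact List.isChain_cons_cons.mpr
            ⟨hne, ih (htail _ _ hab) (htail _ _ hba) (htail _ _ hcd) (htail _ _ hdc)⟩

-- one full pass of B preserves the normal form
theorem nf_altPass (s : String) : nf (altPass s).toList = nf s.toList := by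
  rw [altPass_toList, nf_rep2 _ _ (by decide), nf_rep2 _ _ (by decide),
    nf_rep2 _ _ (by decide), nf_rep2 _ _ (by decide)]

-- B's loop computes the normal form
theorem alt_eq_nf (S : String) : solution_alt S = String.ofList (nf S.toList) := by
  fun_induction solution_alt S with
  | case1 S h =>
      -- the pass changed nothing: the string is irreducible
      have hlen : (altPass S).toList.length = S.toList.length := by rw [h]
      rw [altPass_toList] at hlen
      have h1 := rep2_length_le 'A' 'B' S.toList
      have h2 := rep2_length_le 'B' 'A' (rep2 'A' 'B' S.toList)
      have h3 := rep2_length_le 'C' 'D' (rep2 'B' 'A' (rep2 'A' 'B' S.toList))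
      have h4 := rep2_length_le 'D' 'C' (rep2 'C' 'D' (rep2 'B' 'A' (rep2 'A' 'B' S.toList)))
      have e1 : rep2 'A' 'B' S.toList = S.toList := rep2_eq_of_length _ _ _ (by omega)
      rw [e1] at h2 h3 h4 hlen
      have e2 : rep2 'B' 'A' S.toList = S.toList := rep2_eq_of_length _ _ _ (by omega)
      rw [e2] at h3 h4 hlen
      have e3 : rep2 'C' 'D' S.toList = S.toList := rep2_eq_of_length _ _ _ (by omega)
      rw [e3] at h4 hlen
      have e4 : rep2 'D' 'C' S.toList = S.toList := rep2_eq_of_length _ _ _ (by omega)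
      rw [nf_fix (fix_irr S.toList e1 e2 e3 e4)]
      simp
  | case2 S h ih =>
      rw [ih, nf_altPass]

-- ===== VERDICT (by name: the statement is the Claim_ definition above) =====
theorem solution_spec : Claim_equal_solution := by
  intro S _
  unfold Spec_solution solution
  rw [foldl_step S.toList [] irr_nil, alt_eq_nf]
  rfl
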